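-- pv_equiv track=rewrite | github.com/xiaowu0162/Search-o1 | explorations/20250708_check_reasoning_length.py | segment_thoughts_v2
-- ===== SOURCE A (Python) =====
-- def segment_thoughts_v1(x):
--     return x.strip().split('\n\n')
--
-- def segment_thoughts_v2(x):
--     # note: excluding things like "so" "therefore", "but", "let me"
--     reasoning_word_list = [
--         'okay', 'hmm', 'wait', 'but wait', 'oh wait', 'no wait', 'no, wait', 'but let me', 'but actually', 'alternatively',
--         'now', 'the question', 'ah', 'oh', 'next', 'another angle', 'another approach', 'also', 'hold on', 'looking it up',
--         'another point', 'I don\'t think', 'perhaps I', 'putting this together', 'Putting it all together', 'i\'m', 'but i\'m',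
--         'let me think again', 'I don\'t see', 'maybe I', 'alternative', "I wonder if", "another way", 'an alternative',
--     ]
--     prefix_len = max([len(x) for x in reasoning_word_list])
--     newline_segmented_thoughts = segment_thoughts_v1(x)
--     final_thoughts = []
--     for t in newline_segmented_thoughts:
--         t_lower = t.lower()
--         is_segment_start = False
--         for r_w in reasoning_word_list:
--             if t_lower.startswith(r_w.lower()):
--                 is_segment_start = True
--                 break
--         if is_segment_start or not final_thoughts:
--             final_thoughts.append(t)
--         else:
--             final_thoughts[-1] += '\n\n' + t
--     return final_thoughts
-- ===== SOURCE B (Python) =====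
-- def segment_thoughts_v2(x):
--     # note: excluding things like "so" "therefore", "but", "let me"
--     reasoning_word_list = [
--         'okay', 'hmm', 'wait', 'but wait', 'oh wait', 'no wait', 'no, wait', 'but let me', 'but actually', 'alternatively',
--         'now', 'the question', 'ah', 'oh', 'next', 'another angle', 'another approach', 'also', 'hold on', 'looking it up',
--         'another point', 'I don\'t think', 'perhaps I', 'putting this together', 'Putting it all together', 'i\'m', 'but i\'m',
--         'let me think again', 'I don\'t see', 'maybe I', 'alternative', "I wonder if", "another way", 'an alternative',
--     ]
--     prefixes = tuple(w.lower() for w in reasoning_word_list)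
--
--     def is_start(t):
--         return t.lower().startswith(prefixes)
--
--     def group(segs):
--         # each group = one segment plus the run of following non-start segments
--         if not segs:
--             return []
--         body = []
--         rest = segs[1:]
--         while rest and not is_start(rest[0]):
--             body.append(rest.pop(0))
--         return ['\n\n'.join([segs[0]] + body)] + group(rest)
--
--     return group(x.strip().split('\n\n'))
-- ===== Notes on version B (the rewrite author's own statement) =====
-- stated objective: alternative
-- what changed: A streams segments through one fold that mutates the last output element (dropLast/append on the accumulator); B recursively takes each group at once: a head segment plus the run of following non-reasoning-start segments, joined in one step.
import Mathlib
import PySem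

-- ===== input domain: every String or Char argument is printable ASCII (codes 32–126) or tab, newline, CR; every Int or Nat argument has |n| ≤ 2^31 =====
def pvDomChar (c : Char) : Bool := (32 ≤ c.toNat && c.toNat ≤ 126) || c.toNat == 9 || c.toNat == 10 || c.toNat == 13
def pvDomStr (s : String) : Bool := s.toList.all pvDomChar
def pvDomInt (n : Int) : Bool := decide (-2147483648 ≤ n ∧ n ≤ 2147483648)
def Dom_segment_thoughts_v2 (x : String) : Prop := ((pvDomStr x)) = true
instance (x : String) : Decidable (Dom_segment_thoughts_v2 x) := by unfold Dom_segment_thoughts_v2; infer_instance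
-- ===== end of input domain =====

-- B replaces A's fold that rewrites the last output element by a recursion that emits each
-- group whole (head segment + following non-start run, joined once): same values, different decomposition.

-- ===== PORT A =====
def pvWordsA : List String := [
  "okay", "hmm", "wait", "but wait", "oh wait", "no wait", "no, wait", "but let me", "but actually", "alternatively",
  "now", "the question", "ah", "oh", "next", "another angle", "another approach", "also", "hold on", "looking it up",
  "another point", "I don't think", "perhaps I", "putting this together", "Putting it all together", "i'm", "but i'm",
  "let me think again", "I don't see", "maybe I", "alternative", "I wonder if", "another way", "an alternative"]

-- x.strip().split('\n\n'); the separator is a nonempty literal, so split? is always `some`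
def segment_thoughts_v1 (x : String) : List String :=
  (PySem.Str.split? (PySem.Str.strip x) "\n\n").getD []

-- the inner `for r_w in reasoning_word_list: … break` loop of A
def pvInnerA (t_lower : String) : List String → Bool
  | [] => false
  | r_w :: ws => if PySem.Str.startswith t_lower (PySem.Str.lower r_w) then true else pvInnerA t_lower ws

-- the outer `for t in newline_segmented_thoughts` loop of A (`final_thoughts[-1] += …` on a
-- nonempty accumulator is dropLast ++ [last ++ …])
def pvLoopA (acc : List String) : List String → List String
  | [] => acc
  | t :: ts =>
    let is_segment_start := pvInnerA (PySem.Str.lower t) pvWordsA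
    if is_segment_start || acc.isEmpty then pvLoopA (acc ++ [t]) ts
    else pvLoopA (acc.dropLast ++ [acc.getLast! ++ "\n\n" ++ t]) ts

def segment_thoughts_v2 (x : String) : List String :=
  pvLoopA [] (segment_thoughts_v1 x)

-- ===== PORT B =====
def pvPrefixesB : List String := ([
  "okay", "hmm", "wait", "but wait", "oh wait", "no wait", "no, wait", "but let me", "but actually", "alternatively",
  "now", "the question", "ah", "oh", "next", "another angle", "another approach", "also", "hold on", "looking it up",
  "another point", "I don't think", "perhaps I", "putting this together", "Putting it all together", "i'm", "but i'm",
  "let me think again", "I don't see", "maybe I", "alternative", "I wonder if", "another way", "an alternative"]).map PySem.Str.lower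

def pvIsStartB (t : String) : Bool :=
  pvPrefixesB.any (fun w => PySem.Str.startswith (PySem.Str.lower t) w)

-- B's `while rest and not is_start(rest[0]): body.append(rest.pop(0))` run-collector
def pvRunB : List String → List String × List String
  | [] => ([], [])
  | u :: us =>
    if pvIsStartB u then ([], u :: us)
    else
      let p := pvRunB us
      (u :: p.1, p.2)

theorem pvRunB_snd_le (l : List String) : (pvRunB l).2.length ≤ l.length := by
  induction l with
  | nil => simp [pvRunB]
  | cons u us ih =>
    simp only [pvRunB]
    split
    · simp
    · simpa using Nat.le_succ_of_le ih

def pvGroupB : List String → List String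
  | [] => []
  | t :: rest =>
    PySem.Str.join "\n\n" (t :: (pvRunB rest).1) :: pvGroupB (pvRunB rest).2
termination_by l => l.length
decreasing_by
  simpa using Nat.lt_succ_of_le (pvRunB_snd_le rest)

def segment_thoughts_v2_alt (x : String) : List String :=
  pvGroupB ((PySem.Str.split? (PySem.Str.strip x) "\n\n").getD [])

-- ===== PRECONDITION & SPEC =====
def Spec_segment_thoughts_v2 (x : String) (out : List String) : Prop := out = segment_thoughts_v2_alt x
instance (x : String) (out : List String) : Decidable (Spec_segment_thoughts_v2 x out) := by unfold Spec_segment_thoughts_v2; infer_instance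

-- ===== CLAIM (what is proved, stated in full; the proofs are below) =====
def Claim_equal_segment_thoughts_v2 : Prop := ∀ (x : String), Dom_segment_thoughts_v2 x → Spec_segment_thoughts_v2 x (segment_thoughts_v2 x)

-- ===== LEMMAS AND PROOFS =====

theorem pvGroupB_nil : pvGroupB [] = [] := by rw [pvGroupB]

theorem pvGroupB_cons (t : String) (rest : List String) :
    pvGroupB (t :: rest)
      = PySem.Str.join "\n\n" (t :: (pvRunB rest).1) :: pvGroupB (pvRunB rest).2 := by
  rw [pvGroupB]

-- A's break-on-first-match inner loop is `any` over the same list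
theorem pvInnerA_eq_any (tl : String) (ws : List String) :
    pvInnerA tl ws = ws.any (fun w => PySem.Str.startswith tl (PySem.Str.lower w)) := by
  induction ws with
  | nil => simp [pvInnerA]
  | cons w ws ih =>
    cases hsw : PySem.Str.startswith tl (PySem.Str.lower w) with
    | true => simp only [pvInnerA, hsw, List.any_cons]; simp
    | false => simp only [pvInnerA, hsw, List.any_cons, ← ih]; simp

theorem isStart_agree (t : String) :
    pvInnerA (PySem.Str.lower t) pvWordsA = pvIsStartB t := by
  simp [pvInnerA_eq_any, pvIsStartB, pvPrefixesB, pvWordsA]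

theorem join_singleton (sep c : String) : PySem.Str.join sep [c] = c := by
  apply String.ext
  have := PySem.Chars.join_singleton sep.toList c.toList
  simpa using this

theorem join_cons_cons (sep a b : String) (r : List String) :
    PySem.Str.join sep (a :: b :: r) = a ++ sep ++ PySem.Str.join sep (b :: r) := by
  apply String.ext
  simpa using PySem.Chars.join_cons_cons sep.toList a.toList b.toList (r.map String.toList)

theorem join_merge (cur t : String) (r : List String) :
    PySem.Str.join "\n\n" (cur :: t :: r) = PySem.Str.join "\n\n" ((cur ++ "\n\n" ++ t) :: r) := by
  cases r with
  | nil => simp [join_cons_cons, join_singleton]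
  | cons b r => rw [join_cons_cons, join_cons_cons, join_cons_cons]; simp [String.append_assoc]

-- main invariant: the A-loop with pending group `cur` and finished groups `gs`
theorem loop_invariant (ts : List String) :
    ∀ (gs : List String) (cur : String),
      pvLoopA (gs ++ [cur]) ts
        = gs ++ (PySem.Str.join "\n\n" (cur :: (pvRunB ts).1) :: pvGroupB (pvRunB ts).2) := by
  induction ts with
  | nil => intro gs cur; simp [pvLoopA, pvRunB, pvGroupB_nil, join_singleton]
  | cons t ts ih =>
    intro gs cur
    have hne : ((gs ++ [cur]).isEmpty) = false := by simp
    simp only [pvLoopA, isStart_agree, hne]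
    by_cases h : pvIsStartB t = true
    · rw [h]
      simp only [Bool.true_or, if_true]
      rw [ih (gs ++ [cur]) t]
      simp only [pvRunB, h, if_pos, pvGroupB_cons]
      simp [join_singleton]
    · have hb : pvIsStartB t = false := by simpa using h
      rw [hb]
      simp only [Bool.false_or, if_neg (by simp : ¬ ((false : Bool) = true))]
      have hdl : (gs ++ [cur]).dropLast = gs := by simp
      have hgl : (gs ++ [cur]).getLast! = cur := by
        simp [List.getLast!_eq_getLast?_getD]
      rw [hdl, hgl, ih gs (cur ++ "\n\n" ++ t)]
      simp only [pvRunB, hb]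
      simp [join_merge]

-- ===== VERDICT (by name: the statement is the Claim_ definition above) =====
theorem segment_thoughts_v2_spec : Claim_equal_segment_thoughts_v2 := by
  intro x _
  unfold Spec_segment_thoughts_v2 segment_thoughts_v2 segment_thoughts_v2_alt segment_thoughts_v1
  cases h : (PySem.Str.split? (PySem.Str.strip x) "\n\n").getD [] with
  | nil => simp [pvLoopA, pvGroupB_nil]
  | cons t ts =>
    simp only [pvLoopA, List.isEmpty_nil, Bool.or_true, if_true, List.nil_append]
    rw [pvGroupB_cons]
    simpa using loop_invariant ts [] t
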